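-- pv_equiv track=rewrite | github.com/anushka-singhal/Warehouse-project | warehouse.py | min_vehicles
-- ===== SOURCE A (Python) =====
-- def min_vehicles(weights, max_limit):
--     weights.sort(reverse=True)
--     vehicles = 0
--
--     while weights:
--         current_weight = weights.pop(0)
--         vehicles += 1
--
--         for i in range(len(weights)):
--             if current_weight + weights[i] <= max_limit:
--                 weights.pop(i)
--                 break
--
--     return vehicles
-- ===== SOURCE B (Python) =====
-- def min_vehicles(weights, max_limit):
--     # Two-pointer pairing on the descending-sorted list: pair the heaviest
--     # remaining item with the lightest one when they fit together.
--     weights.sort(reverse=True)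
--     vehicles = 0
--     i, j = 0, len(weights) - 1
--     while i <= j:
--         if i < j and weights[i] + weights[j] <= max_limit:
--             j -= 1
--         i += 1
--         vehicles += 1
--     return vehicles
-- ===== Notes on version B (the rewrite author's own statement) =====
-- stated objective: faster
-- what changed: Replaced the destructive scan-for-heaviest-fitting-partner loop (pop(0) plus an inner linear scan with pop(i)) by the classic two-pointer pairing over the descending-sorted list (heaviest with lightest), which yields the same vehicle count.
import Mathlib
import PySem

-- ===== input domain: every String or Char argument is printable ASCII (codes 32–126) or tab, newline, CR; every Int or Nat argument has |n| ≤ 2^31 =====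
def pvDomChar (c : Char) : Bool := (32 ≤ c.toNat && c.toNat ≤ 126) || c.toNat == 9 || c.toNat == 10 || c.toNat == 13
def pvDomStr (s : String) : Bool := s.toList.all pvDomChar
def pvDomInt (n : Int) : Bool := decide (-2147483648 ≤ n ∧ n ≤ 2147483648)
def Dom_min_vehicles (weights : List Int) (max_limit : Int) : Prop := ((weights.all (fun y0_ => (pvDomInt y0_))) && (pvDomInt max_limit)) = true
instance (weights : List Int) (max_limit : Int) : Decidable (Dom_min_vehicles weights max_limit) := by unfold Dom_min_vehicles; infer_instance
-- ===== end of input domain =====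

-- B replaces A's quadratic destructive scan (pop heaviest, scan for the heaviest fitting
-- partner) by the two-pointer pairing on the descending-sorted list; return values agree.
-- Side effects differ: Python A drains the caller's list to empty, B only sorts it in place.

-- ===== PORT A =====
-- inner `for i in range(len(weights)): if fit: weights.pop(i); break`
def pvRff (m x : Int) : List Int → List Int
  | [] => []
  | e :: t => if x + e ≤ m then t else e :: pvRff m x t

theorem pvRff_length_le (m x : Int) (l : List Int) : (pvRff m x l).length ≤ l.length := by
  induction l with
  | nil => simp [pvRff]
  | cons e t ih => simp only [pvRff]; split
                   · simp
                   · simp only [List.length_cons]; omega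

-- the outer `while weights:` loop
def pvALoop (m : Int) : List Int → Int
  | [] => 0
  | x :: rest => 1 + pvALoop m (pvRff m x rest)
termination_by l => l.length
decreasing_by
  exact Nat.lt_succ_of_le (pvRff_length_le m x rest)

def min_vehicles (weights : List Int) (max_limit : Int) : Int :=
  pvALoop max_limit (PySem.List.sorted weights (fun x => x) true)

-- ===== PORT B =====
-- `while i <= j:` two-pointer loop; both index reads are always in range, so `.getD 0` never fires
def pvTpLoop (w : List Int) (m : Int) (i j vehicles : Int) : Int :=
  if i ≤ j then
    let j' := if i < j ∧ (PySem.List.pyGet? w i).getD 0 + (PySem.List.pyGet? w j).getD 0 ≤ m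
              then j - 1 else j
    pvTpLoop w m (i + 1) j' (vehicles + 1)
  else vehicles
termination_by (j + 1 - i).toNat
decreasing_by
  split <;> omega

def min_vehicles_alt (weights : List Int) (max_limit : Int) : Int :=
  let w := PySem.List.sorted weights (fun x => x) true
  pvTpLoop w max_limit 0 ((w.length : Int) - 1) 0

-- ===== PRECONDITION & SPEC =====
def Spec_min_vehicles (weights : List Int) (max_limit : Int) (out : Int) : Prop := out = min_vehicles_alt weights max_limit
instance (weights : List Int) (max_limit : Int) (out : Int) : Decidable (Spec_min_vehicles weights max_limit out) := by unfold Spec_min_vehicles; infer_instance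

-- ===== CLAIM (what is proved, stated in full; the proofs are below) =====
def Claim_equal_min_vehicles : Prop := ∀ (weights : List Int) (max_limit : Int), Dom_min_vehicles weights max_limit → Spec_min_vehicles weights max_limit (min_vehicles weights max_limit)

-- ===== LEMMAS AND PROOFS =====

-- list model of B's loop: remove the head and, when head + last fits, also the last element
def pvTpList (m : Int) : List Int → Int
  | [] => 0
  | [_] => 1
  | x :: y :: t =>
      if x + (y :: t).getLast (by simp) ≤ m
      then 1 + pvTpList m ((y :: t).dropLast)
      else 1 + pvTpList m (y :: t)
termination_by l => l.length
decreasing_by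
  · simp only [List.length_dropLast, List.length_cons]; omega
  · simp only [List.length_cons]; omega

theorem pvRff_no_fit (m x : Int) : ∀ (l : List Int), (∀ e ∈ l, ¬ (x + e ≤ m)) →
    pvRff m x l = l := by
  intro l
  induction l with
  | nil => intro _; rfl
  | cons a t ih =>
      intro h
      simp only [pvRff]
      rw [if_neg (h a (by simp)), ih (fun e he => h e (List.mem_cons_of_mem _ he))]

theorem pvRff_append_no_fit (m x : Int) (v : List Int) : ∀ (u : List Int), (∀ e ∈ u, ¬ (x + e ≤ m)) →
    pvRff m x (u ++ v) = u ++ pvRff m x v := by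
  intro u
  induction u with
  | nil => intro _; rfl
  | cons a t ih =>
      intro h
      simp only [List.cons_append, pvRff]
      rw [if_neg (h a (by simp)), ih (fun e he => h e (List.mem_cons_of_mem _ he))]

theorem pvRff_decomp (m x y : Int) (u w : List Int) (hu : ∀ e ∈ u, ¬ (x + e ≤ m))
    (hy : x + y ≤ m) : pvRff m x (u ++ y :: w) = u ++ w := by
  rw [pvRff_append_no_fit m x _ u hu]
  simp [pvRff, if_pos hy]

theorem pvALoop_cons (m x : Int) (l : List Int) :
    pvALoop m (x :: l) = 1 + pvALoop m (pvRff m x l) := by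
  rw [pvALoop]

-- first-fit decomposition of a list in which some element fits
theorem exists_first_fit (m x : Int) (l : List Int) (h : ∃ e ∈ l, x + e ≤ m) :
    ∃ u y w, l = u ++ y :: w ∧ (∀ e ∈ u, ¬ (x + e ≤ m)) ∧ x + y ≤ m := by
  induction l with
  | nil => simp at h
  | cons a t ih =>
      by_cases ha : x + a ≤ m
      · exact ⟨[], a, t, by simp, by simp, ha⟩
      · obtain ⟨e, he, hfit⟩ := h
        rcases List.mem_cons.mp he with rfl | he
        · exact absurd hfit ha
        · obtain ⟨u, y, w, rfl, hu, hy⟩ := ih ⟨e, he, hfit⟩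
          exact ⟨a :: u, y, w, by simp, by
            intro e' he'
            rcases List.mem_cons.mp he' with rfl | he'
            · exact ha
            · exact hu e' he', hy⟩

-- KEY exchange lemma: once every element of the tail block fits every other element
-- (and fits every element of the prefix), A's count depends only on the block's size.
theorem pvALoop_block (m : Int) : ∀ (n : ℕ) (u B1 B2 : List Int),
    u.length + B1.length ≤ n → B1.length = B2.length →
    (∀ e ∈ u, ∀ b ∈ B1, e + b ≤ m) → (∀ a ∈ B1, ∀ b ∈ B1, a + b ≤ m) →
    (∀ e ∈ u, ∀ b ∈ B2, e + b ≤ m) → (∀ a ∈ B2, ∀ b ∈ B2, a + b ≤ m) →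
    pvALoop m (u ++ B1) = pvALoop m (u ++ B2) := by
  intro n
  induction n with
  | zero =>
      intro u B1 B2 hn hlen _ _ _ _
      have hu : u = [] := by
        cases u with
        | nil => rfl
        | cons a t => simp at hn
      have h1 : B1 = [] := by
        cases B1 with
        | nil => rfl
        | cons a t => subst hu; simp at hn
      have h2 : B2 = [] := by
        cases B2 with
        | nil => rfl
        | cons a t => subst h1; simp at hlen
      simp [hu, h1, h2]
  | succ n ih =>
      intro u B1 B2 hn hlen hub1 hb1 hub2 hb2
      cases u with
      | nil =>
          cases B1 with
          | nil =>
              cases B2 with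
              | nil => rfl
              | cons c B2' => simp at hlen
          | cons b B1' =>
              cases B2 with
              | nil => simp at hlen
              | cons c B2' =>
                  cases B1' with
                  | nil =>
                      cases B2' with
                      | nil => simp [pvALoop_cons, pvRff, pvALoop]
                      | cons c2 B2'' => simp at hlen
                  | cons b2 B1'' =>
                      cases B2' with
                      | nil => simp at hlen
                      | cons c2 B2'' =>
                          have hb : b + b2 ≤ m := hb1 b (by simp) b2 (by simp)
                          have hc : c + c2 ≤ m := hb2 c (by simp) c2 (by simp)
                          simp only [List.nil_append, pvALoop_cons, pvRff, if_pos hb, if_pos hc]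
                          have := ih [] B1'' B2'' (by simp at hn ⊢; omega) (by simp at hlen ⊢; omega)
                            (by simp)
                            (fun a ha b hb => hb1 a (by simp [ha]) b (by simp [hb]))
                            (by simp)
                            (fun a ha b hb => hb2 a (by simp [ha]) b (by simp [hb]))
                          simp only [List.nil_append] at this
                          omega
      | cons x u' =>
          by_cases hfit : ∃ e ∈ u', x + e ≤ m
          · obtain ⟨a, y, w, hdec, hano, hyfit⟩ := exists_first_fit m x u' hfit
            subst hdec
            have hrw : ∀ (B : List Int),
                pvRff m x ((a ++ y :: w) ++ B) = (a ++ w) ++ B := by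
              intro B
              have : (a ++ y :: w) ++ B = a ++ y :: (w ++ B) := by simp
              rw [this, pvRff_decomp m x y a (w ++ B) hano hyfit]
              simp
            simp only [List.cons_append, pvALoop_cons, hrw]
            have := ih (a ++ w) B1 B2
              (by simp at hn ⊢; omega) hlen
              (fun e he b hb => hub1 e (by
                  rcases List.mem_append.mp he with h | h
                  · exact List.mem_cons_of_mem _ (by simp [h])
                  · exact List.mem_cons_of_mem _ (by simp [h])) b hb)
              hb1
              (fun e he b hb => hub2 e (by
                  rcases List.mem_append.mp he with h | h
                  · exact List.mem_cons_of_mem _ (by simp [h])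
                  · exact List.mem_cons_of_mem _ (by simp [h])) b hb)
              hb2
            omega
          · push Not at hfit
            cases B1 with
            | nil =>
                cases B2 with
                | nil => rfl
                | cons c B2' => simp at hlen
            | cons b B1' =>
                cases B2 with
                | nil => simp at hlen
                | cons c B2' =>
                    have hxb : x + b ≤ m := hub1 x (by simp) b (by simp)
                    have hxc : x + c ≤ m := hub2 x (by simp) c (by simp)
                    have e1 : pvRff m x (u' ++ b :: B1') = u' ++ B1' :=
                      pvRff_decomp m x b u' B1' (fun e he hle => absurd hle (not_le.mpr (hfit e he))) hxb
                    have e2 : pvRff m x (u' ++ c :: B2') = u' ++ B2' :=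
                      pvRff_decomp m x c u' B2' (fun e he hle => absurd hle (not_le.mpr (hfit e he))) hxc
                    simp only [List.cons_append, pvALoop_cons, e1, e2]
                    have := ih u' B1' B2'
                      (by simp at hn ⊢; omega) (by simp at hlen ⊢; omega)
                      (fun e he b' hb' => hub1 e (by simp [he]) b' (by simp [hb']))
                      (fun a' ha' b' hb' => hb1 a' (by simp [ha']) b' (by simp [hb']))
                      (fun e he b' hb' => hub2 e (by simp [he]) b' (by simp [hb']))
                      (fun a' ha' b' hb' => hb2 a' (by simp [ha']) b' (by simp [hb']))
                    omega

theorem pvTpList_cons (m x : Int) (rest : List Int) (h : rest ≠ []) :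
    pvTpList m (x :: rest) =
      if x + rest.getLast h ≤ m then 1 + pvTpList m rest.dropLast else 1 + pvTpList m rest := by
  cases rest with
  | nil => exact absurd rfl h
  | cons y t => rw [pvTpList]

theorem last_min : ∀ (l : List Int) (h : l ≠ []), l.Pairwise (fun a b => b ≤ a) →
    ∀ e ∈ l, l.getLast h ≤ e := by
  intro l
  induction l with
  | nil => intro h; exact absurd rfl h
  | cons a t ih =>
      intro _ hp e he
      cases t with
      | nil =>
          rcases List.mem_cons.mp he with rfl | he'
          · simp
          · simp at he'
      | cons b t' =>
          have hp' : (b :: t').Pairwise (fun a b => b ≤ a) := (List.pairwise_cons.mp hp).2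
          have hale : ∀ e' ∈ b :: t', e' ≤ a := (List.pairwise_cons.mp hp).1
          rw [List.getLast_cons (by simp)]
          rcases List.mem_cons.mp he with rfl | he'
          · exact le_trans (hale _ (List.getLast_mem (by simp))) le_rfl
          · exact ih (by simp) hp' e he'

-- on a descending-sorted list, A's greedy equals the two-pointer count
theorem pvALoop_eq_pvTpList (m : Int) : ∀ (n : ℕ) (L : List Int),
    L.length ≤ n → L.Pairwise (fun a b => b ≤ a) → pvALoop m L = pvTpList m L := by
  intro n
  induction n with
  | zero =>
      intro L hlen _
      have : L = [] := by cases L with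
        | nil => rfl
        | cons a t => simp at hlen
      simp [this, pvALoop, pvTpList]
  | succ n ih =>
      intro L hlen hp
      cases L with
      | nil => simp [pvALoop, pvTpList]
      | cons x rest =>
          cases rest with
          | nil => simp [pvALoop_cons, pvRff, pvALoop, pvTpList]
          | cons y t =>
              have hrne : (y :: t) ≠ [] := by simp
              have hxall : ∀ e ∈ y :: t, e ≤ x := (List.pairwise_cons.mp hp).1
              have hpr : (y :: t).Pairwise (fun a b => b ≤ a) := (List.pairwise_cons.mp hp).2
              rw [pvTpList_cons m x (y :: t) hrne, pvALoop_cons]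
              by_cases hz : x + (y :: t).getLast hrne ≤ m
              · rw [if_pos hz]
                have hfit : ∃ e ∈ y :: t, x + e ≤ m := ⟨_, List.getLast_mem hrne, hz⟩
                obtain ⟨u, yy, w, hdec, hu, hyy⟩ := exists_first_fit m x (y :: t) hfit
                have hrff : pvRff m x (y :: t) = u ++ w := by
                  rw [hdec]; exact pvRff_decomp _ _ _ _ _ hu hyy
                have hmemu : ∀ e ∈ u, e ∈ y :: t := by
                  intro e he; rw [hdec]; exact List.mem_append_left _ he
                have hmemw : ∀ b ∈ w, b ∈ y :: t := by
                  intro b hb; rw [hdec]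
                  exact List.mem_append_right _ (List.mem_cons_of_mem _ hb)
                have hyymem : yy ∈ y :: t := by rw [hdec]; simp
                have hwyy : ∀ b ∈ w, b ≤ yy := by
                  have : (yy :: w).Pairwise (fun a b => b ≤ a) :=
                    ((List.pairwise_append.mp (hdec ▸ hpr)).2.1)
                  exact (List.pairwise_cons.mp this).1
                have hupw : u.Pairwise (fun a b => b ≤ a) :=
                  (List.pairwise_append.mp (hdec ▸ hpr)).1
                cases w with
                | nil =>
                    have hlast : (y :: t).getLast hrne = yy := by
                      have h2 : (y :: t).getLast hrne = (u ++ [yy]).getLast (by simp) := by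
                        congr 1
                      rw [h2, List.getLast_append]
                      simp
                    have hdrop : (y :: t).dropLast = u := by
                      have h2 : (y :: t).dropLast = (u ++ [yy]).dropLast := by rw [hdec]
                      rw [h2, List.dropLast_concat]
                    rw [hrff, hdrop, List.append_nil]
                    have hlu : u.length + 1 = t.length + 1 := by
                      have := congrArg List.length hdec
                      simpa using this.symm
                    have := ih u (by simp at hlen; omega) hupw
                    omega
                | cons w0 w1 =>
                    have hWne : (w0 :: w1) ≠ [] := by simp
                    have hWsplit : (w0 :: w1).dropLast ++ [(w0 :: w1).getLast hWne] = w0 :: w1 :=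
                      List.dropLast_append_getLast hWne
                    have hres2 : y :: t = (u ++ yy :: (w0 :: w1).dropLast) ++ [(w0 :: w1).getLast hWne] := by
                      rw [hdec]
                      conv_lhs => rw [← hWsplit]
                      simp
                    have hdrop : (y :: t).dropLast = u ++ yy :: (w0 :: w1).dropLast := by
                      rw [hres2, List.dropLast_concat]
                    -- all block elements are ≤ yy; all elements are ≤ x; x + yy ≤ m
                    have hbnd1 : ∀ b ∈ (w0 :: w1), b ≤ yy := hwyy
                    have hbnd2 : ∀ b ∈ yy :: (w0 :: w1).dropLast, b ≤ yy := by
                      intro b hb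
                      rcases List.mem_cons.mp hb with rfl | hb'
                      · exact le_rfl
                      · exact hwyy b ((List.dropLast_sublist _).subset hb')
                    have hx1 : ∀ a ∈ (w0 :: w1), a ≤ x := fun a ha => hxall a (hmemw a ha)
                    have hx2 : ∀ a ∈ yy :: (w0 :: w1).dropLast, a ≤ x := by
                      intro a ha
                      rcases List.mem_cons.mp ha with rfl | ha'
                      · exact hxall _ hyymem
                      · exact hxall a (hmemw a ((List.dropLast_sublist _).subset ha'))
                    have hblock := pvALoop_block m (u.length + (w0 :: w1).length) u
                      (w0 :: w1) (yy :: (w0 :: w1).dropLast) le_rfl (by simp)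
                      (fun e he b hb => by
                        have := hxall e (hmemu e he); have := hbnd1 b hb; omega)
                      (fun a ha b hb => by
                        have := hx1 a ha; have := hbnd1 b hb; omega)
                      (fun e he b hb => by
                        have := hxall e (hmemu e he); have := hbnd2 b hb; omega)
                      (fun a ha b hb => by
                        have := hx2 a ha; have := hbnd2 b hb; omega)
                    rw [hrff, hblock, ← hdrop]
                    have hdl : (y :: t).dropLast.length ≤ n := by simp at hlen ⊢; omega
                    have := ih ((y :: t).dropLast) hdl (hpr.sublist (List.dropLast_sublist _))
                    omega
              · rw [if_neg hz]
                have hnofit : ∀ e ∈ y :: t, ¬ (x + e ≤ m) := by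
                  intro e he hle
                  have := last_min (y :: t) hrne hpr e he
                  omega
                rw [pvRff_no_fit m x _ hnofit]
                have := ih (y :: t) (by simp at hlen ⊢; omega) hpr
                omega

theorem getElem_idx_eq (w : List Int) (i1 i2 : ℕ) (h1 : i1 < w.length) (h2 : i2 < w.length)
    (h : i1 = i2) : w[i1] = w[i2] := by subst h; rfl

theorem seg_nil (w : List Int) (a b : ℕ) (h : b ≤ a) : (w.take b).drop a = [] := by
  apply List.drop_eq_nil_of_le
  simp only [List.length_take]
  omega

theorem seg_cons (w : List Int) (a b : ℕ) (h1 : a < b) (h2 : b ≤ w.length) :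
    (w.take b).drop a = w[a]'(by omega) :: (w.take b).drop (a + 1) := by
  rw [List.drop_eq_getElem_cons (by simp only [List.length_take]; omega)]
  congr 1
  simp [List.getElem_take]

theorem seg_getLast (w : List Int) (a b : ℕ) (h1 : a < b) (h2 : b ≤ w.length)
    (hne : (w.take b).drop a ≠ []) :
    ((w.take b).drop a).getLast hne = w[b - 1]'(by omega) := by
  rw [List.getLast_eq_getElem]
  simp only [List.getElem_drop, List.getElem_take, List.length_drop, List.length_take]
  apply getElem_idx_eq
  omega

theorem seg_dropLast (w : List Int) (a b : ℕ) (h2 : b ≤ w.length) :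
    ((w.take b).drop a).dropLast = (w.take (b - 1)).drop a := by
  apply List.ext_getElem
  · simp only [List.length_dropLast, List.length_drop, List.length_take]; omega
  · intro i hi1 hi2
    simp [List.getElem_dropLast, List.getElem_drop, List.getElem_take]

-- B's index loop computes pvTpList on the segment w[i..j]
theorem pvTpLoop_spec (m : Int) (w : List Int) : ∀ (fuel : ℕ) (i j c : Int),
    0 ≤ i → j < (w.length : Int) → (j + 1 - i).toNat ≤ fuel →
    pvTpLoop w m i j c = c + pvTpList m ((w.take (j + 1).toNat).drop i.toNat) := by
  intro fuel
  induction fuel with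
  | zero =>
      intro i j c h0 hj hfuel
      have hij : ¬ i ≤ j := by omega
      rw [pvTpLoop, if_neg hij, seg_nil w _ _ (by omega)]
      simp [pvTpList]
  | succ f ih =>
      intro i j c h0 hj hfuel
      by_cases hij : i ≤ j
      · rw [pvTpLoop, if_pos hij]
        have hjnat : j.toNat < w.length := by omega
        have hinat : i.toNat < w.length := by omega
        have hgi : (PySem.List.pyGet? w i).getD 0 = w[i.toNat] := by
          rw [PySem.List.pyGet?_of_nonneg w h0, List.getElem?_eq_getElem hinat]
          rfl
        have hgj : (PySem.List.pyGet? w j).getD 0 = w[j.toNat] := by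
          rw [PySem.List.pyGet?_of_nonneg w (by omega), List.getElem?_eq_getElem hjnat]
          rfl
        have hb : (j + 1).toNat ≤ w.length := by omega
        by_cases hlt : i < j
        · have hab : i.toNat < (j + 1).toNat := by omega
          have hsc := seg_cons w i.toNat (j + 1).toNat hab hb
          have htne : (w.take (j + 1).toNat).drop (i.toNat + 1) ≠ [] := by
            have : ((w.take (j + 1).toNat).drop (i.toNat + 1)).length ≠ 0 := by
              simp only [List.length_drop, List.length_take]; omega
            exact fun h => this (by simp [h])
          have hlast : ((w.take (j + 1).toNat).drop (i.toNat + 1)).getLast htne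
              = w[j.toNat] := by
            rw [seg_getLast w _ _ (by omega) hb htne]
            exact getElem_idx_eq w _ _ (by omega) hjnat (by omega)
          rw [hsc, pvTpList_cons m _ _ htne, hlast]
          by_cases hfits : w[i.toNat] + w[j.toNat] ≤ m
          · rw [if_pos ⟨hlt, by rw [hgi, hgj]; exact hfits⟩, if_pos hfits]
            rw [ih (i + 1) (j - 1) (c + 1) (by omega) (by omega) (by omega)]
            rw [seg_dropLast w _ _ hb]
            have e1 : (i + 1).toNat = i.toNat + 1 := by omega
            have e2 : (j - 1 + 1).toNat = (j + 1).toNat - 1 := by omega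
            rw [e1, e2]
            ring
          · rw [if_neg (by
              intro hcon
              exact hfits (by rw [← hgi, ← hgj]; exact hcon.2)), if_neg hfits]
            rw [ih (i + 1) j (c + 1) (by omega) hj (by omega)]
            have e1 : (i + 1).toNat = i.toNat + 1 := by omega
            rw [e1]
            ring
        · have hieqj : i = j := by omega
          have hsc := seg_cons w i.toNat (j + 1).toNat (by omega) hb
          have htail : (w.take (j + 1).toNat).drop (i.toNat + 1) = [] :=
            seg_nil w _ _ (by omega)
          rw [if_neg (by intro hcon; exact hlt hcon.1)]
          rw [ih (i + 1) j (c + 1) (by omega) hj (by omega)]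
          have e1 : (i + 1).toNat = i.toNat + 1 := by omega
          rw [e1, htail, hsc, htail]
          simp [pvTpList]
      · rw [pvTpLoop, if_neg hij, seg_nil w _ _ (by omega)]
        simp [pvTpList]

-- ===== VERDICT (by name: the statement is the Claim_ definition above) =====
theorem min_vehicles_spec : Claim_equal_min_vehicles := by
  intro weights max_limit _
  unfold Spec_min_vehicles min_vehicles min_vehicles_alt
  set w := PySem.List.sorted weights (fun x => x) true with hw
  have hlen : ((w.length : Int) - 1) < (w.length : Int) := by omega
  rw [pvTpLoop_spec max_limit w ((w.length : Int) - 1 + 1 - 0).toNat 0 ((w.length : Int) - 1) 0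
      le_rfl hlen le_rfl]
  have hseg : (w.take ((w.length : Int) - 1 + 1).toNat).drop (0 : Int).toNat = w := by
    simp
  rw [hseg]
  have hsorted : w.Pairwise (fun a b => b ≤ a) := by
    have := PySem.List.sorted_pairwise_rev weights (fun x => x) (κ := Int)
    simpa using this
  rw [pvALoop_eq_pvTpList max_limit w.length w le_rfl hsorted]
  ring
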